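-- pv_equiv track=rewrite | github.com/windszzlang/AutoAM | utils.py | generate_relation_labels
-- ===== SOURCE A (Python) =====
-- def generate_relation_labels(ARs, num_acs):
--     relation_labels = []
--     for i in range(num_acs):
--         for j in range(num_acs):
--             if i == j:
--                 continue
--             is_existing = False
--             for AR_type in ARs.keys():
--                 if [i, j] in ARs[AR_type]:
--                     relation_labels.append(AR_type)
--                     is_existing = True
--                     break
--             if not is_existing:
--                 relation_labels.append('none')
--     return relation_labels
-- ===== SOURCE B (Python) =====
-- def generate_relation_labels(ARs, num_acs):
--     # Build a hash index once: pair -> first relation type (in key order) listing it.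
--     label = {}
--     for AR_type, entries in ARs.items():
--         for e in entries:
--             label.setdefault(tuple(e), AR_type)
--     return [label.get((i, j), 'none')
--             for i in range(num_acs) for j in range(num_acs) if i != j]
-- ===== Notes on version B (the rewrite author's own statement) =====
-- stated objective: faster
-- what changed: B builds a dict from each relation entry to its first AR type in one pass (setdefault), then emits labels for all ordered pairs by dict lookup, eliminating A's per-pair scan over every relation list; intended as faster, a timing run measured B 150-220x ahead of A at the largest size both finish.
import Mathlib
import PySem

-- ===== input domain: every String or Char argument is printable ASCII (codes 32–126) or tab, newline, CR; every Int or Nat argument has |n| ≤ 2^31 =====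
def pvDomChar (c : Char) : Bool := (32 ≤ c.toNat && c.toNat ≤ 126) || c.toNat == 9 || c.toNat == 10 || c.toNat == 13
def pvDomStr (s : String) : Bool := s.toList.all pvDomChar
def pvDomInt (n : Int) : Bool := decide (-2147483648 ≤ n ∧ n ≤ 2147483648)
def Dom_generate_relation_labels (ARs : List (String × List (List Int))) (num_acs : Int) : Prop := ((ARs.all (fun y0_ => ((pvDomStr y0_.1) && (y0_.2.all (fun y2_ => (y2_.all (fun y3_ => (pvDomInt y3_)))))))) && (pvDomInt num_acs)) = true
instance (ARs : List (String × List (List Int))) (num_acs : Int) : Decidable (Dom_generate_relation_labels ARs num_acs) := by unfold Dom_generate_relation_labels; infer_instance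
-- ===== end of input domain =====

-- B replaces A's per-pair scan over every relation list by a dict (pair -> first AR type)
-- built once with setdefault, then emits all labels by lookup.

-- ===== PORT A =====
-- literal transliteration: double loop over range(num_acs), inner loop over dict keys with break = find?
def generate_relation_labels (ARs : List (String × List (List Int))) (num_acs : Int) : List String :=
  let d := PySem.Dict.ofList ARs
  (PySem.List.pyRange 0 num_acs 1).foldl (fun acc i =>
    (PySem.List.pyRange 0 num_acs 1).foldl (fun acc j =>
      if i == j then acc
      else
        match (PySem.Dict.keys d).find? (fun k => (PySem.Dict.getD d k []).contains [i, j]) with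
        | some t => acc ++ [t]
        | none => acc ++ ["none"]) acc) []

-- ===== PORT B =====
-- literal transliteration of Source B: one pass over items building the index with setdefault
-- (Python's tuple(e) key is the entry e itself under the List Int key type), then a
-- comprehension over all ordered pairs reading the index with get(..., 'none').
def generate_relation_labels_alt (ARs : List (String × List (List Int))) (num_acs : Int) : List String :=
  let d := PySem.Dict.ofList ARs
  let label : PySem.Dict (List Int) String :=
    d.items.foldl (fun lab p => p.2.foldl (fun lab e => lab.setdefault e p.1) lab) PySem.Dict.empty
  (PySem.List.pyRange 0 num_acs 1).foldl (fun acc i =>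
    (PySem.List.pyRange 0 num_acs 1).foldl (fun acc j =>
      if i == j then acc else acc ++ [label.getD [i, j] "none"]) acc) []

-- ===== PRECONDITION & SPEC =====
def Spec_generate_relation_labels (ARs : List (String × List (List Int))) (num_acs : Int) (out : List String) : Prop := out = generate_relation_labels_alt ARs num_acs
instance (ARs : List (String × List (List Int))) (num_acs : Int) (out : List String) : Decidable (Spec_generate_relation_labels ARs num_acs out) := by unfold Spec_generate_relation_labels; infer_instance

-- ===== CLAIM (what is proved, stated in full; the proofs are below) =====
def Claim_equal_generate_relation_labels : Prop := ∀ (ARs : List (String × List (List Int))) (num_acs : Int), Dom_generate_relation_labels ARs num_acs → Spec_generate_relation_labels ARs num_acs (generate_relation_labels ARs num_acs)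

-- ===== LEMMAS AND PROOFS =====

-- find? only looks at the predicate's values on members
theorem pv_find?_congr_mem {α : Type} {l : List α} {p q : α → Bool}
    (h : ∀ a ∈ l, p a = q a) : l.find? p = l.find? q := by
  induction l with
  | nil => rfl
  | cons a l ih =>
    simp only [List.find?_cons]
    rw [h a (List.mem_cons_self)]
    cases q a
    · exact ih (fun a ha => h a (List.mem_cons_of_mem _ ha))
    · rfl

-- the inner setdefault loop over one entry list
theorem pv_inner_get? (t : String) (es : List (List Int)) (lab : PySem.Dict (List Int) String) (e : List Int) :
    (es.foldl (fun lab e' => lab.setdefault e' t) lab).get? e =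
      ((lab.get? e).orElse (fun _ => if e ∈ es then some t else none)) := by
  induction es generalizing lab with
  | nil => cases h : lab.get? e <;> simp [Option.orElse, h]
  | cons e' es ih =>
    simp only [List.foldl_cons]
    rw [ih]
    by_cases he : e = e'
    · subst he
      rw [PySem.Dict.get?_setdefault_self]
      cases h : lab.get? e <;> simp [Option.orElse]
    · rw [PySem.Dict.get?_setdefault_of_ne lab t he]
      cases h : lab.get? e <;> simp [Option.orElse, he]

-- the whole index build: first item (in order) whose entry list contains e wins
theorem pv_label_get? (l : List (String × List (List Int))) (lab : PySem.Dict (List Int) String) (e : List Int) :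
    (l.foldl (fun lab p => p.2.foldl (fun lab e' => lab.setdefault e' p.1) lab) lab).get? e =
      ((lab.get? e).orElse (fun _ => (l.find? (fun p => p.2.contains e)).map (·.1))) := by
  induction l generalizing lab with
  | nil => cases h : lab.get? e <;> simp [Option.orElse, h]
  | cons p l ih =>
    simp only [List.foldl_cons]
    rw [ih, pv_inner_get?]
    by_cases hm : e ∈ p.2
    · cases h : lab.get? e <;> simp [Option.orElse, hm]
    · have : p.2.contains e = false := by simpa using hm
      cases h : lab.get? e <;> simp [Option.orElse, hm]

-- A's scan over keys equals the find? over items, for a dict with nodup keys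
theorem pv_keys_find? (d : PySem.Dict String (List (List Int))) (hnd : d.keys.Nodup) (e : List Int) :
    d.keys.find? (fun k => (d.getD k []).contains e) =
      (d.items.find? (fun p => p.2.contains e)).map (·.1) := by
  have hk : d.keys = d.items.map (·.1) := rfl
  rw [hk, List.find?_map]
  apply congrArg
  apply pv_find?_congr_mem
  intro p hp
  obtain ⟨k, v⟩ := p
  have : d.getD k [] = v := PySem.Dict.getD_of_mem_items d hp hnd []
  simp [Function.comp, this]

-- ===== VERDICT (by name: the statement is the Claim_ definition above) =====
theorem generate_relation_labels_spec : Claim_equal_generate_relation_labels := by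
  intro ARs num_acs _
  unfold Spec_generate_relation_labels generate_relation_labels generate_relation_labels_alt
  set d := PySem.Dict.ofList ARs with hd
  have hnd : d.keys.Nodup := PySem.Dict.nodup_keys_ofList ARs
  have key : ∀ i j : Int,
      (match d.keys.find? (fun k => (PySem.Dict.getD d k []).contains [i, j]) with
        | some t => (fun (t : String) => t) t
        | none => "none") =
      (d.items.foldl (fun lab p => p.2.foldl (fun lab e => lab.setdefault e p.1) lab)
          PySem.Dict.empty).getD [i, j] "none" := by
    intro i j
    rw [PySem.Dict.getD_eq_get?_getD, pv_label_get?, pv_keys_find? d hnd]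
    cases h : d.items.find? (fun p => p.2.contains [i, j]) <;>
      simp [Option.orElse, PySem.Dict.get?_empty]
  simp only []
  congr 1
  funext acc i
  congr 1
  funext acc j
  by_cases hij : i = j
  · simp [hij]
  · have hb : (i == j) = false := by simpa using hij
    rw [hb]
    simp only [Bool.false_eq_true, if_false]
    have := key i j
    cases h : d.keys.find? (fun k => (PySem.Dict.getD d k []).contains [i, j]) with
    | some t => rw [h] at this; simp at this; rw [← this]
    | none => rw [h] at this; simp at this; rw [← this]
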